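-- pv_equiv track=rewrite | github.com/MariusPopa1/CS | Laboratories/Lab3/American.py | create_playfair_matrix
-- ===== SOURCE A (Python) =====
-- def create_playfair_matrix(key):
--     # American alphabet excluding 'J'
--     alphabet = "ABCDEFGHIKLMNOPQRSTUVWXYZ"
--     key = key.upper().replace('J', 'I')
--     key = "".join(dict.fromkeys(key))  # Remove duplicates while maintaining order
--     matrix = [char for char in key if char in alphabet]
--
--     for char in alphabet:
--         if char not in matrix:
--             matrix.append(char)
--
--     # Create a 5x5 matrix
--     playfair_matrix = [matrix[i:i + 5] for i in range(0, 25, 5)]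
--     return playfair_matrix
-- ===== SOURCE B (Python) =====
-- def create_playfair_matrix(key):
--     alphabet = "ABCDEFGHIKLMNOPQRSTUVWXYZ"
--     k = key.upper().replace('J', 'I')
--
--     def rank(c):
--         i = k.find(c)
--         return i if i != -1 else len(k) + alphabet.find(c)
--
--     ordered = sorted(alphabet, key=rank)
--     return [ordered[i:i + 5] for i in range(0, 25, 5)]
-- ===== Notes on version B (the rewrite author's own statement) =====
-- stated objective: alternative
-- what changed: Replaces A's two-phase construction (dedup the key, filter it, then a loop appending each missing alphabet letter with a 'not in matrix' scan) by sorting the 25 alphabet letters with a rank key: first-occurrence index in the processed key, or len(key)+alphabet position for letters absent from the key.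
import Mathlib
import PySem

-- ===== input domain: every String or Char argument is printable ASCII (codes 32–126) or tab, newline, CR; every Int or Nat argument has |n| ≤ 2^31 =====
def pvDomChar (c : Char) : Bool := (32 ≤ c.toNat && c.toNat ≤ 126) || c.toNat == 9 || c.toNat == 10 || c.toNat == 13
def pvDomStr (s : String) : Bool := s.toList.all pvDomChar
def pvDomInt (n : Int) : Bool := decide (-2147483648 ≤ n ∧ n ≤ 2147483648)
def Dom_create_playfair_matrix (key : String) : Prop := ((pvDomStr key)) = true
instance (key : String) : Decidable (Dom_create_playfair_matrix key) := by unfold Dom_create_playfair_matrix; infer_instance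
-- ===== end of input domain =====

-- B replaces A's build-and-append construction (filter the deduplicated key, then a loop appending
-- missing alphabet letters) by sorting the 25 alphabet letters with a first-occurrence rank key;
-- objective: alternative (a sort-by-rank algorithm, not measurably faster).

-- ===== PORT A =====
def create_playfair_matrix (key : String) : List (List String) :=
  let alphabet : List Char := "ABCDEFGHIKLMNOPQRSTUVWXYZ".toList
  let key1 : List Char := PySem.Chars.replace (PySem.Chars.upper key.toList) ['J'] ['I']
  let key2 : List Char := PySem.List.dedup key1
  let matrix : List Char := key2.filter (fun c => alphabet.contains c)
  let matrix : List Char :=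
    alphabet.foldl (fun m c => if m.contains c then m else m ++ [c]) matrix
  (PySem.List.pyRange 0 25 5).map (fun i =>
    (PySem.List.slice matrix (some i) (some (i + 5))).map (fun c => String.ofList [c]))

-- ===== PORT B =====
def create_playfair_matrix_alt (key : String) : List (List String) :=
  let alphabet : List Char := "ABCDEFGHIKLMNOPQRSTUVWXYZ".toList
  let k : List Char := PySem.Chars.replace (PySem.Chars.upper key.toList) ['J'] ['I']
  let rank : Char → Int := fun c =>
    let i := PySem.Chars.find k [c]
    if i ≠ -1 then i else PySem.Chars.len k + PySem.Chars.find alphabet [c]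
  let ordered : List Char := PySem.List.sorted alphabet rank
  (PySem.List.pyRange 0 25 5).map (fun i =>
    (PySem.List.slice ordered (some i) (some (i + 5))).map (fun c => String.ofList [c]))

-- ===== PRECONDITION & SPEC =====
def Spec_create_playfair_matrix (key : String) (out : List (List String)) : Prop := out = create_playfair_matrix_alt key
instance (key : String) (out : List (List String)) : Decidable (Spec_create_playfair_matrix key out) := by unfold Spec_create_playfair_matrix; infer_instance

-- ===== CLAIM (what is proved, stated in full; the proofs are below) =====
def Claim_equal_create_playfair_matrix : Prop := ∀ (key : String), Dom_create_playfair_matrix key → Spec_create_playfair_matrix key (create_playfair_matrix key)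

-- ===== LEMMAS AND PROOFS =====

-- first index is minimal: any position holding c bounds idxOf from above
theorem pvIdxOf_le (s : List Char) (c : Char) (i : Nat) (h : i < s.length) (hc : s[i] = c) :
    s.idxOf c ≤ i := by
  unfold List.idxOf
  by_contra hlt
  push_neg at hlt
  have := List.not_of_lt_findIdx hlt
  simp at this
  exact this hc

-- [c] is a prefix of s.drop n exactly when s[n] = c
theorem pvSingletonPrefixDrop (s : List Char) (c : Char) (n : Nat) :
    [c] <+: s.drop n ↔ ∃ h : n < s.length, s[n] = c := by
  constructor
  · rintro ⟨u, hu⟩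
    have hlen : n < s.length := by
      by_contra hge
      push_neg at hge
      rw [List.drop_eq_nil_of_le hge] at hu
      simp at hu
    refine ⟨hlen, ?_⟩
    rw [List.drop_eq_getElem_cons hlen] at hu
    exact (List.cons.injEq _ _ _ _ ▸ hu).1.symm
  · rintro ⟨h, hc⟩
    rw [List.drop_eq_getElem_cons h, hc]
    exact ⟨_, rfl⟩

-- str.find with a single-character needle is the first-occurrence index
theorem pvFindSingletonMem (s : List Char) (c : Char) (h : c ∈ s) :
    PySem.Chars.find s [c] = (s.idxOf c : Int) := by
  have hnn : 0 ≤ PySem.Chars.find s [c] :=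
    (PySem.Chars.find_nonneg_iff s [c]).2 ((List.singleton_infix_iff c s).2 h)
  obtain ⟨hpre, hmin⟩ := PySem.Chars.find_spec hnn
  obtain ⟨hlt, hc⟩ := (pvSingletonPrefixDrop s c _).1 hpre
  have h1 : s.idxOf c ≤ (PySem.Chars.find s [c]).toNat := pvIdxOf_le s c _ hlt hc
  have h2 : ¬ (s.idxOf c < (PySem.Chars.find s [c]).toNat) := by
    intro hlt2
    exact hmin _ hlt2 ((pvSingletonPrefixDrop s c _).2
      ⟨List.idxOf_lt_length_of_mem h, List.getElem_idxOf (List.idxOf_lt_length_of_mem h)⟩)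
  omega
theorem pvFindSingletonNotMem (s : List Char) (c : Char) (h : c ∉ s) :
    PySem.Chars.find s [c] = -1 :=
  (PySem.Chars.find_eq_neg_one_iff s [c]).2 (fun hin => h ((List.singleton_infix_iff c s).1 hin))

-- ordered dedup lists its elements in increasing first-occurrence order
theorem pvOfListCons (x : Char) (xs : List Char) :
    PySem.Set.ofList (x :: xs) = x :: (PySem.Set.ofList xs).filter (fun y => !(PySem.Set.contains [x] y)) := by
  have h1 : PySem.Set.ofList (x :: xs) = PySem.Set.update [x] xs := rfl
  rw [h1, PySem.Set.update_eq_append_filter]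
  rfl

theorem pvDedupPairwise (k : List Char) :
    (PySem.Set.ofList k).Pairwise (fun a b => k.idxOf a < k.idxOf b) := by
  induction k with
  | nil => exact List.Pairwise.nil
  | cons x xs ih =>
    rw [pvOfListCons]
    refine List.Pairwise.cons ?_ ?_
    · intro b hb
      have hbx : b ≠ x := by
        have := (List.mem_filter.1 hb).2
        simp [PySem.Set.contains_eq_listContains] at this
        exact this
      rw [List.idxOf_cons_self, List.idxOf_cons_ne _ hbx.symm]
      omega
    · refine ((ih.filter _).imp_of_mem ?_)
      intro a b ha hb hab
      have hax : a ≠ x := by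
        have := (List.mem_filter.1 ha).2
        simp [PySem.Set.contains_eq_listContains] at this
        exact this
      have hbx : b ≠ x := by
        have := (List.mem_filter.1 hb).2
        simp [PySem.Set.contains_eq_listContains] at this
        exact this
      rw [List.idxOf_cons_ne _ hax.symm, List.idxOf_cons_ne _ hbx.symm]
      omega

-- a duplicate-free list is in increasing index order
theorem pvNodupPairwiseIdxOf (l : List Char) (h : l.Nodup) :
    l.Pairwise (fun a b => l.idxOf a < l.idxOf b) := by
  induction l with
  | nil => exact List.Pairwise.nil
  | cons x xs ih =>
    have hx : x ∉ xs := (List.nodup_cons.1 h).1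
    refine List.Pairwise.cons ?_ ?_
    · intro b hb
      have hbx : b ≠ x := fun he => hx (he ▸ hb)
      rw [List.idxOf_cons_self, List.idxOf_cons_ne _ hbx.symm]
      omega
    · refine ((ih (List.nodup_cons.1 h).2).imp_of_mem ?_)
      intro a b ha hb hab
      have hax : a ≠ x := fun he => hx (he ▸ ha)
      have hbx : b ≠ x := fun he => hx (he ▸ hb)
      rw [List.idxOf_cons_ne _ hax.symm, List.idxOf_cons_ne _ hbx.symm]
      omega

-- the alphabet literal used by both programs, and its rank function (proof-side names)
def pvAlphabet : List Char := "ABCDEFGHIKLMNOPQRSTUVWXYZ".toList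
def pvRank (k : List Char) : Char → Int := fun c =>
  let i := PySem.Chars.find k [c]
  if i ≠ -1 then i else PySem.Chars.len k + PySem.Chars.find pvAlphabet [c]

theorem pvRank_mem (k : List Char) (c : Char) (h : c ∈ k) :
    pvRank k c = (k.idxOf c : Int) := by
  unfold pvRank
  rw [pvFindSingletonMem k c h]
  simp
theorem pvRank_not_mem (k : List Char) (c : Char) (h : c ∉ k) (hA : c ∈ pvAlphabet) :
    pvRank k c = (k.length : Int) + (pvAlphabet.idxOf c : Int) := by
  unfold pvRank
  rw [pvFindSingletonNotMem k c h]
  simp [PySem.Chars.len_eq, pvFindSingletonMem pvAlphabet c hA]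

-- core list-level equality: sorting the alphabet by rank yields A's matrix list
theorem pvCoreEq (k : List Char) :
    PySem.List.sorted pvAlphabet (pvRank k)
      = pvAlphabet.foldl (fun m c => if m.contains c then m else m ++ [c])
          ((PySem.List.dedup k).filter (fun c => pvAlphabet.contains c)) := by
  have hAnd : pvAlphabet.Nodup := by decide
  -- name the two halves of A's matrix
  set F : List Char := (PySem.List.dedup k).filter (fun c => pvAlphabet.contains c) with hF
  have hfold : pvAlphabet.foldl (fun m c => if m.contains c then m else m ++ [c]) F
      = F ++ pvAlphabet.filter (fun y => !(PySem.Set.contains F y)) := by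
    have h1 : pvAlphabet.foldl (fun m c => if m.contains c then m else m ++ [c]) F
        = PySem.Set.update F pvAlphabet := rfl
    rw [h1, PySem.Set.update_eq_append_filter, PySem.Set.ofList_eq_self_of_nodup _ hAnd]
  rw [hfold]
  set R : List Char := pvAlphabet.filter (fun y => !(PySem.Set.contains F y)) with hR
  -- memberships
  have hFsub : ∀ c, c ∈ F → c ∈ k ∧ c ∈ pvAlphabet := by
    intro c hc
    obtain ⟨h1, h2⟩ := List.mem_filter.1 hc
    rw [PySem.List.dedup_eq_ofList] at h1
    exact ⟨(PySem.Set.mem_ofList k c).1 h1, by simpa using h2⟩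
  have hRsub : ∀ c, c ∈ R → c ∈ pvAlphabet ∧ c ∉ k := by
    intro c hc
    obtain ⟨h1, h2⟩ := List.mem_filter.1 hc
    refine ⟨h1, fun hck => ?_⟩
    simp [PySem.Set.contains_eq_listContains] at h2
    apply h2
    apply List.mem_filter.2
    refine ⟨?_, by simpa using h1⟩
    rw [PySem.List.dedup_eq_ofList]
    exact (PySem.Set.mem_ofList k c).2 hck
  -- A's matrix is a permutation of the alphabet
  have hFnd : F.Nodup := by
    rw [hF, PySem.List.dedup_eq_ofList]
    exact (PySem.Set.nodup_ofList k).filter _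
  have hperm : (F ++ R).Perm pvAlphabet := by
    rw [List.perm_ext_iff_of_nodup ?_ hAnd]
    · intro a
      constructor
      · intro ha
        rcases List.mem_append.1 ha with h | h
        · exact (hFsub a h).2
        · exact (hRsub a h).1
      · intro ha
        by_cases hmem : a ∈ F
        · exact List.mem_append.2 (Or.inl hmem)
        · refine List.mem_append.2 (Or.inr (List.mem_filter.2 ⟨ha, ?_⟩))
          simp [PySem.Set.contains_eq_listContains]
          exact hmem
    · refine List.Nodup.append hFnd (hAnd.filter _) ?_
      intro a haF haR
      have := (List.mem_filter.1 haR).2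
      simp [PySem.Set.contains_eq_listContains] at this
      exact this haF
  -- A's matrix is strictly increasing under the rank key
  have hpw : (F ++ R).Pairwise (fun a b => pvRank k a < pvRank k b) := by
    rw [List.pairwise_append]
    refine ⟨?_, ?_, ?_⟩
    · have base : F.Pairwise (fun a b => k.idxOf a < k.idxOf b) := by
        rw [hF, PySem.List.dedup_eq_ofList]
        exact (pvDedupPairwise k).filter _
      refine base.imp_of_mem ?_
      intro a b ha hb hab
      rw [pvRank_mem k a (hFsub a ha).1, pvRank_mem k b (hFsub b hb).1]
      exact_mod_cast hab
    · have base : R.Pairwise (fun a b => pvAlphabet.idxOf a < pvAlphabet.idxOf b) :=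
        (pvNodupPairwiseIdxOf pvAlphabet hAnd).filter _
      refine base.imp_of_mem ?_
      intro a b ha hb hab
      rw [pvRank_not_mem k a (hRsub a ha).2 (hRsub a ha).1,
          pvRank_not_mem k b (hRsub b hb).2 (hRsub b hb).1]
      omega
    · intro a ha b hb
      rw [pvRank_mem k a (hFsub a ha).1,
          pvRank_not_mem k b (hRsub b hb).2 (hRsub b hb).1]
      have h1 : k.idxOf a < k.length := List.idxOf_lt_length_of_mem (hFsub a ha).1
      have h2 : (0 : Int) ≤ (pvAlphabet.idxOf b : Int) := Int.natCast_nonneg _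
      omega
  exact PySem.List.sorted_eq_of_perm_of_pairwise_lt _ _ _ hperm hpw

-- ===== VERDICT (by name: the statement is the Claim_ definition above) =====
theorem create_playfair_matrix_spec : Claim_equal_create_playfair_matrix := by
  intro key _
  unfold Spec_create_playfair_matrix create_playfair_matrix create_playfair_matrix_alt
  simp only []
  rw [show "ABCDEFGHIKLMNOPQRSTUVWXYZ".toList = pvAlphabet from rfl]
  rw [show (fun c => let i := PySem.Chars.find (PySem.Chars.replace (PySem.Chars.upper key.toList) ['J'] ['I']) [c];
        if i ≠ -1 then i else PySem.Chars.len (PySem.Chars.replace (PySem.Chars.upper key.toList) ['J'] ['I']) + PySem.Chars.find pvAlphabet [c])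
      = pvRank (PySem.Chars.replace (PySem.Chars.upper key.toList) ['J'] ['I']) from rfl]
  rw [pvCoreEq]
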